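-- pv_equiv track=rewrite | github.com/yunx-z/COMBO | passage_matching/build_psg_pairs.py | resize_matrix
-- ===== SOURCE A (Python) =====
-- def resize_matrix(matrix, new_row_cnt, new_col_cnt):
--     original_row_cnt = len(matrix)
--     original_col_cnt = len(matrix[0])
--     # assert original_row_cnt >= new_row_cnt
--     # assert original_col_cnt >= new_col_cnt
--     new_matrix = []
--     for i in range(new_row_cnt):
--         new_row = []
--         for j in range(new_col_cnt):
--             new_row.append(matrix[i%original_row_cnt][j%original_col_cnt])
--         new_matrix.append(new_row)
--     return new_matrix
-- ===== SOURCE B (Python) =====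
-- def resize_matrix(matrix, new_row_cnt, new_col_cnt):
--     # Tile the matrix in both dimensions instead of per-cell modular indexing.
--     c0 = len(matrix[0])
--     row_reps = -(-new_row_cnt // len(matrix)) if new_row_cnt > 0 else 0
--     rows = (matrix * row_reps)[:new_row_cnt]
--     if new_col_cnt <= 0 or not rows:
--         return [[] for _ in rows]
--     col_reps = -(-new_col_cnt // c0)
--     return [(row[:c0] * col_reps)[:new_col_cnt] for row in rows]
-- ===== Notes on version B (the rewrite author's own statement) =====
-- stated objective: simpler
-- what changed: Replaces the per-cell double loop with modular indexing by whole-list tiling: repeat the matrix ceil(new_row_cnt/rows) times and slice to new_row_cnt, and when any columns are needed build each row as the first-row-width prefix repeated ceil(new_col_cnt/cols) times and sliced to new_col_cnt.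
import Mathlib
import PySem

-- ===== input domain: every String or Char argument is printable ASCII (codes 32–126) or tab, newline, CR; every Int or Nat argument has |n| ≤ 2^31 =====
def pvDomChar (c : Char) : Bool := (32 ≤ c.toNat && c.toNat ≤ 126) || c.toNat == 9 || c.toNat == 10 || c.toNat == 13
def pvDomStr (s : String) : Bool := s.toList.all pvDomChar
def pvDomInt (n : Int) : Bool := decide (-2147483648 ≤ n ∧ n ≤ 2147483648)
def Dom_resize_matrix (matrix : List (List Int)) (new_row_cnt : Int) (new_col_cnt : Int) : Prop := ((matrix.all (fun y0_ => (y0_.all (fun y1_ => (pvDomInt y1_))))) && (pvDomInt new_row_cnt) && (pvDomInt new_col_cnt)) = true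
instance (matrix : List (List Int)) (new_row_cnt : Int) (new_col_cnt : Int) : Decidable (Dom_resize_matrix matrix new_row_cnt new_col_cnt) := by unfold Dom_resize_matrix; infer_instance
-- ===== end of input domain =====

-- B replaces the per-cell modular double loop by tiling (list repetition + slicing); same cost, simpler.

-- ===== PORT A =====
-- literal port of A: len(matrix[0]) is pyGetD matrix 0 [] (Pre_ guarantees matrix ≠ []);
-- each append becomes acc ++ [·]; matrix[i%r][j%c] uses PySem.Int.mod and pyGetD (in range under Pre_).
def resize_matrix (matrix : List (List Int)) (new_row_cnt : Int) (new_col_cnt : Int) : List (List Int) :=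
  let original_row_cnt : Int := matrix.length
  let original_col_cnt : Int := (PySem.List.pyGetD matrix 0 []).length
  (PySem.List.pyRange 0 new_row_cnt 1).foldl (fun new_matrix i =>
    new_matrix ++ [(PySem.List.pyRange 0 new_col_cnt 1).foldl (fun new_row j =>
      new_row ++ [PySem.List.pyGetD (PySem.List.pyGetD matrix (PySem.Int.mod i original_row_cnt) [])
                    (PySem.Int.mod j original_col_cnt) 0]) []]) []

-- ===== PORT B =====
-- literal port of B: '-(-n // d)' is -(floordiv (-n) d); 'xs * k' is pyRepeat; 'xs[:n]' is slice none (some n);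
-- the 'new_col_cnt <= 0 or not rows' guard is the if-then-else below.
def resize_matrix_alt (matrix : List (List Int)) (new_row_cnt : Int) (new_col_cnt : Int) : List (List Int) :=
  let c0 : Int := (PySem.List.pyGetD matrix 0 []).length
  let row_reps : Int := if 0 < new_row_cnt then -(PySem.Int.floordiv (-new_row_cnt) (matrix.length : Int)) else 0
  let rows := PySem.List.slice (PySem.List.pyRepeat matrix row_reps) none (some new_row_cnt)
  if new_col_cnt ≤ 0 ∨ rows = [] then rows.map (fun _ => [])
  else
    let col_reps : Int := -(PySem.Int.floordiv (-new_col_cnt) c0)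
    rows.map (fun row =>
      PySem.List.slice (PySem.List.pyRepeat (PySem.List.slice row none (some c0)) col_reps) none (some new_col_cnt))

-- ===== PRECONDITION & SPEC =====
-- Pre_ excludes exactly the inputs on which A raises: matrix = [] (IndexError on matrix[0]), and —
-- only when both new dimensions are positive, so A actually enters both loops — an empty first row
-- (ZeroDivisionError on j % 0) or a row A reads that is shorter than the columns A reads from it
-- (IndexError). A returns a value on every other input and B matches it there.
def Pre_resize_matrix (matrix : List (List Int)) (new_row_cnt : Int) (new_col_cnt : Int) : Prop :=
  matrix ≠ [] ∧ (0 < new_col_cnt → 0 < new_row_cnt →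
    0 < matrix.headI.length ∧
      ∀ row ∈ matrix.take (min matrix.length new_row_cnt.toNat),
        min matrix.headI.length new_col_cnt.toNat ≤ row.length)
instance (matrix : List (List Int)) (new_row_cnt : Int) (new_col_cnt : Int) : Decidable (Pre_resize_matrix matrix new_row_cnt new_col_cnt) := by unfold Pre_resize_matrix; infer_instance

def pvWitness_resize_matrix : List (List Int) × Int × Int := ([[1, 2], [3, 4], [5, 6]], 5, 3)

def Spec_resize_matrix (matrix : List (List Int)) (new_row_cnt : Int) (new_col_cnt : Int) (out : List (List Int)) : Prop := out = resize_matrix_alt matrix new_row_cnt new_col_cnt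
instance (matrix : List (List Int)) (new_row_cnt : Int) (new_col_cnt : Int) (out : List (List Int)) : Decidable (Spec_resize_matrix matrix new_row_cnt new_col_cnt out) := by unfold Spec_resize_matrix; infer_instance

-- ===== CLAIM (what is proved, stated in full; the proofs are below) =====
def Claim_equal_resize_matrix : Prop := ∀ (matrix : List (List Int)) (new_row_cnt : Int) (new_col_cnt : Int), Dom_resize_matrix matrix new_row_cnt new_col_cnt → Pre_resize_matrix matrix new_row_cnt new_col_cnt → Spec_resize_matrix matrix new_row_cnt new_col_cnt (resize_matrix matrix new_row_cnt new_col_cnt)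

-- ===== LEMMAS AND PROOFS =====

theorem pv_getElem?_flatten_replicate {α : Type} (xs : List α) (m k : Nat) (hk : k < m * xs.length) :
    ((List.replicate m xs).flatten)[k]? = xs[k % xs.length]? := by
  induction m generalizing k with
  | zero => omega
  | succ m ih =>
    rw [List.replicate_succ, List.flatten_cons, List.getElem?_append]
    by_cases hkL : k < xs.length
    · simp [hkL, Nat.mod_eq_of_lt hkL]
    · have hL : 0 < xs.length := by by_contra h; simp at h; simp [h] at hk
      have hk' : k - xs.length < m * xs.length := by
        have : (m + 1) * xs.length = m * xs.length + xs.length := by ring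
        omega
      rw [if_neg hkL, ih (k - xs.length) hk']
      have : (k - xs.length) % xs.length = k % xs.length := by
        conv_rhs => rw [← Nat.sub_add_cancel (le_of_not_gt hkL)]
        rw [Nat.add_mod_right]
      rw [this]

theorem pv_take_pyRepeat {α : Type} (xs : List α) (d : α) (m n : Nat) (h : n ≤ m * xs.length) :
    (PySem.List.pyRepeat xs (m : Int)).take n
      = (List.range n).map (fun k => xs.getD (k % xs.length) d) := by
  apply List.ext_getElem?
  intro k
  rw [List.getElem?_take]
  by_cases hk : k < n
  · have hL : 0 < xs.length := by by_contra h'; simp at h'; simp [h'] at h; omega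
    rw [if_pos hk, List.getElem?_map, List.getElem?_range hk]
    show ((List.replicate (Int.toNat (m:Int)) xs).flatten)[k]? = _
    rw [Int.toNat_natCast, pv_getElem?_flatten_replicate xs m k (by omega)]
    simp [List.getD_eq_getElem?_getD, List.getElem?_eq_getElem (Nat.mod_lt k hL)]
  · rw [if_neg hk, List.getElem?_map]
    rw [List.getElem?_eq_none (by simpa using hk)]
    rfl

theorem pv_ceil_mul_ge (n d : Int) (hd : 0 < d) :
    n ≤ (-(PySem.Int.floordiv (-n) d)) * d := by
  have h1 := PySem.Int.floordiv_mul_add_mod (-n) d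
  have h2 := PySem.Int.mod_nonneg (-n) hd
  nlinarith

theorem pv_ceil_pos (n d : Int) (hn : 0 < n) (hd : 0 < d) :
    0 < -(PySem.Int.floordiv (-n) d) := by
  have := pv_ceil_mul_ge n d hd
  nlinarith

theorem pv_getD_zero_headI (matrix : List (List Int)) :
    PySem.List.pyGetD matrix 0 ([] : List Int) = matrix.headI := by
  cases matrix with
  | nil => rfl
  | cons h t => simp [PySem.List.pyGetD_zero]

-- the tiled row equals A's inner loop row, for any row A actually reads (positive column count)
theorem pv_inner (row0 : List Int) (c : Nat) (nc : Int) (hnc : 0 < nc) (hc : 0 < c)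
    (hlen : min c nc.toNat ≤ row0.length) :
    (List.range nc.toNat).map (fun (j : Nat) => PySem.List.pyGetD row0 (PySem.Int.mod (j : Int) (c : Int)) 0)
      = PySem.List.slice (PySem.List.pyRepeat (PySem.List.slice row0 none (some (c : Int)))
          (-(PySem.Int.floordiv (-nc) (c : Int)))) none (some nc) := by
  set q : Int := -(PySem.Int.floordiv (-nc) (c : Int)) with hq
  have hqpos : 0 < q := pv_ceil_pos nc c (by omega) (by exact_mod_cast hc)
  have hqc : nc ≤ q * c := pv_ceil_mul_ge nc c (by exact_mod_cast hc)
  rw [PySem.List.slice_to_natCast, PySem.List.slice_to _ hnc.le]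
  have hqe : ((q.toNat : Nat) : Int) = q := Int.toNat_of_nonneg hqpos.le
  have h3 : nc.toNat ≤ q.toNat * c := by
    zify
    rw [hqe, Int.toNat_of_nonneg hnc.le]
    exact hqc
  have hbound : nc.toNat ≤ q.toNat * (row0.take c).length := by
    rw [List.length_take]
    by_cases hr : c ≤ row0.length
    · rw [Nat.min_eq_left hr]; exact h3
    · have h1 : nc.toNat ≤ row0.length := by omega
      have h2 : 1 ≤ q.toNat := by omega
      rw [Nat.min_eq_right (by omega)]
      calc nc.toNat ≤ row0.length := h1
        _ ≤ q.toNat * row0.length := Nat.le_mul_of_pos_left _ (by omega)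
  rw [← hqe, pv_take_pyRepeat (row0.take c) 0 q.toNat nc.toNat hbound]
  apply List.map_congr_left
  intro j hj
  rw [List.mem_range] at hj
  rw [PySem.Int.mod_natCast, PySem.List.pyGetD_natCast]
  rw [List.length_take]
  by_cases hr : c ≤ row0.length
  · rw [Nat.min_eq_left hr]
    have hjc : j % c < c := Nat.mod_lt j hc
    rw [List.getD_eq_getElem?_getD, List.getD_eq_getElem?_getD,
      List.getElem?_take, if_pos hjc, List.getElem?_eq_getElem (by omega)]
  · have h1 : nc.toNat ≤ row0.length := by omega
    have hj' : j < row0.length := by omega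
    rw [Nat.min_eq_right (by omega), Nat.mod_eq_of_lt (by omega), Nat.mod_eq_of_lt hj',
      List.take_of_length_le (by omega)]

theorem pv_main (matrix : List (List Int)) (nr nc : Int)
    (hne : matrix ≠ [])
    (hcol : 0 < nc → 0 < nr → 0 < matrix.headI.length ∧
      ∀ row ∈ matrix.take (min matrix.length nr.toNat), min matrix.headI.length nc.toNat ≤ row.length) :
    resize_matrix matrix nr nc = resize_matrix_alt matrix nr nc := by
  have hr : 0 < matrix.length := List.length_pos_iff.mpr hne
  unfold resize_matrix resize_matrix_alt
  dsimp only
  rw [pv_getD_zero_headI]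
  simp only [PySem.List.foldl_append_singleton_eq_map, List.nil_append,
    PySem.List.pyRange_one, Int.sub_zero, zero_add, List.map_map]
  by_cases hnr : 0 < nr
  case neg =>
    have : nr.toNat = 0 := by omega
    rw [if_neg hnr, this]
    simp [PySem.List.pyRepeat, PySem.List.slice]
  case pos =>
    rw [if_pos hnr, PySem.List.slice_to _ hnr.le]
    set rr : Int := -(PySem.Int.floordiv (-nr) (matrix.length : Int)) with hrr
    have hrrpos : 0 < rr := pv_ceil_pos nr matrix.length (by omega) (by exact_mod_cast hr)
    have hrre : ((rr.toNat : Nat) : Int) = rr := Int.toNat_of_nonneg hrrpos.le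
    have hbound : nr.toNat ≤ rr.toNat * matrix.length := by
      zify
      rw [hrre, Int.toNat_of_nonneg hnr.le]
      exact pv_ceil_mul_ge nr matrix.length (by exact_mod_cast hr)
    rw [← hrre, pv_take_pyRepeat matrix [] rr.toNat nr.toNat hbound]
    have hrowsne : (List.range nr.toNat).map (fun k => matrix.getD (k % matrix.length) []) ≠ [] := by
      simp [List.range_eq_nil]
      omega
    by_cases hnc : 0 < nc
    case neg =>
      rw [if_pos (Or.inl (by omega)), List.map_map]
      apply List.map_congr_left
      intro k _
      have : nc.toNat = 0 := by omega
      simp [this]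
    case pos =>
      rw [if_neg (fun h => h.elim (by omega) hrowsne), List.map_map]
      apply List.map_congr_left
      intro k hk
      rw [List.mem_range] at hk
      have hklt : k % matrix.length < matrix.length := Nat.mod_lt k hr
      simp only [Function.comp]
      rw [PySem.Int.mod_natCast, PySem.List.pyGetD_natCast]
      refine pv_inner (matrix.getD (k % matrix.length) []) matrix.headI.length nc hnc
        (hcol hnc hnr).1 ?_
      have hmem : matrix.getD (k % matrix.length) [] ∈ matrix.take (min matrix.length nr.toNat) := by
        rw [List.getD_eq_getElem?_getD, List.getElem?_eq_getElem hklt]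
        have hlt : k % matrix.length < (matrix.take (min matrix.length nr.toNat)).length := by
          rw [List.length_take]
          have := Nat.mod_le k matrix.length
          omega
        have heq : (matrix.take (min matrix.length nr.toNat))[k % matrix.length]'hlt
            = matrix[k % matrix.length]'hklt := List.getElem_take
        rw [← heq]
        exact List.getElem_mem hlt
      exact (hcol hnc hnr).2 _ hmem

-- ===== VERDICT (by name: the statement is the Claim_ definition above) =====
theorem resize_matrix_spec : Claim_equal_resize_matrix := by
  intro matrix nr nc _ hpre
  obtain ⟨hne, hcol⟩ := hpre
  unfold Spec_resize_matrix
  exact pv_main matrix nr nc hne hcol
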